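-- pv_equiv track=rewrite | github.com/janneesa/MetropoliaNeuralNetworkProject | chatbots/emma/emma.py | get_blocked_ngram_tokens
-- ===== SOURCE A (Python) =====
-- def get_blocked_ngram_tokens(reply_tokens: list[int], ngram_size: int) -> set[int]:
--     if ngram_size < 2:
--         return set()
--
--     prefix_len = ngram_size - 1
--     if len(reply_tokens) < prefix_len:
--         return set()
--
--     prefix = tuple(reply_tokens[-prefix_len:])
--     blocked = set()
--
--     for start in range(len(reply_tokens) - ngram_size + 1):
--         ngram = reply_tokens[start : start + ngram_size]
--         if tuple(ngram[:-1]) == prefix: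
--             blocked.add(ngram[-1])
--
--     return blocked
-- ===== SOURCE B (Python) =====
-- def get_blocked_ngram_tokens(reply_tokens: list[int], ngram_size: int) -> set[int]:
--     # Rolling exact integer encoding (base 2**33, tokens offset by 2**31) of the
--     # sliding (ngram_size-1)-window: one O(1)-update pass instead of slicing and
--     # comparing a tuple at every start position.
--     if ngram_size < 2:
--         return set()
--     m = ngram_size - 1
--     n = len(reply_tokens)
--     if n < m:
--         return set()
--     BASE = 2 ** 33
--     OFF = 2 ** 31
--     target = 0
--     for t in reply_tokens[n - m:]:
--         target = target * BASE + (t + OFF)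
--     top = BASE ** (m - 1)
--     h = 0
--     for t in reply_tokens[:m]:
--         h = h * BASE + (t + OFF)
--     blocked = set()
--     for i in range(m, n):
--         if h == target:
--             blocked.add(reply_tokens[i])
--         h = (h - (reply_tokens[i - m] + OFF) * top) * BASE + (reply_tokens[i] + OFF)
--     return blocked
-- ===== Notes on version B (the rewrite author's own statement) =====
-- stated objective: alternative
-- what changed: Replaced the per-start slice-and-tuple-compare scan with a single pass maintaining an exact rolling base-2^33 integer encoding of the sliding (ngram_size-1)-window, compared against the encoding of the trailing prefix.
import Mathlib
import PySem

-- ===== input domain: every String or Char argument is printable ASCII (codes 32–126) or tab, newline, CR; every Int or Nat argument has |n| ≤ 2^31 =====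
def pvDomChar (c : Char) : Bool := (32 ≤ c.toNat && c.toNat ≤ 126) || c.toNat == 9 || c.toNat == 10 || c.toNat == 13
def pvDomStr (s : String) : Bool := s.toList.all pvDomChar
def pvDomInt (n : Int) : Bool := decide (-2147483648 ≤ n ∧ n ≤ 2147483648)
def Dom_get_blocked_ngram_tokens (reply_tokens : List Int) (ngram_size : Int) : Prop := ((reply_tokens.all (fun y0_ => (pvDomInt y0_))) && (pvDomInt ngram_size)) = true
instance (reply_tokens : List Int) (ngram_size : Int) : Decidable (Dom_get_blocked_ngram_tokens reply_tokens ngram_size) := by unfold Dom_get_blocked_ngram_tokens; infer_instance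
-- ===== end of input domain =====

-- B replaces A's per-start slice-and-compare scan by one pass with an exact rolling
-- base-2^33 integer encoding of the sliding window (alternative algorithm, same values).

-- ===== PORT A =====
def get_blocked_ngram_tokens (reply_tokens : List Int) (ngram_size : Int) : List Int :=
  if ngram_size < 2 then [] else
  let prefix_len := ngram_size - 1
  if (reply_tokens.length : Int) < prefix_len then [] else
  let pref := PySem.List.slice reply_tokens (some (-prefix_len)) none
  (PySem.List.pyRange 0 ((reply_tokens.length : Int) - ngram_size + 1) 1).foldl
    (fun blocked start =>
      let ngram := PySem.List.slice reply_tokens (some start) (some (start + ngram_size))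
      if PySem.List.slice ngram none (some (-1)) = pref
      -- ngram[-1]: always in range when the loop body runs (ngram has length ngram_size ≥ 2)
      then PySem.Set.add blocked (PySem.List.pyGetD ngram (-1) 0)
      else blocked)
    []

-- ===== PORT B =====
def pvBASE : Int := 2 ^ 33
def pvOFF : Int := 2 ^ 31

def get_blocked_ngram_tokens_alt (reply_tokens : List Int) (ngram_size : Int) : List Int :=
  if ngram_size < 2 then [] else
  let m := ngram_size - 1
  let n : Int := reply_tokens.length
  if n < m then [] else
  let target := (PySem.List.slice reply_tokens (some (n - m)) none).foldl
    (fun h t => h * pvBASE + (t + pvOFF)) 0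
  -- BASE ** (m - 1): m ≥ 1 here, so the Nat exponent (m-1).toNat is exact
  let top := pvBASE ^ (m - 1).toNat
  let h0 := (PySem.List.slice reply_tokens none (some m)).foldl
    (fun h t => h * pvBASE + (t + pvOFF)) 0
  ((PySem.List.pyRange m n 1).foldl
    (fun (st : Int × List Int) i =>
      ((st.1 - (PySem.List.pyGetD reply_tokens (i - m) 0 + pvOFF) * top) * pvBASE
          + (PySem.List.pyGetD reply_tokens i 0 + pvOFF),
       if st.1 = target then PySem.Set.add st.2 (PySem.List.pyGetD reply_tokens i 0) else st.2))
    (h0, [])).2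

-- ===== PRECONDITION & SPEC =====
def Spec_get_blocked_ngram_tokens (reply_tokens : List Int) (ngram_size : Int) (out : List Int) : Prop := out = get_blocked_ngram_tokens_alt reply_tokens ngram_size
instance (reply_tokens : List Int) (ngram_size : Int) (out : List Int) : Decidable (Spec_get_blocked_ngram_tokens reply_tokens ngram_size out) := by unfold Spec_get_blocked_ngram_tokens; infer_instance

-- ===== CLAIM (what is proved, stated in full; the proofs are below) =====
def Claim_equal_get_blocked_ngram_tokens : Prop := ∀ (reply_tokens : List Int) (ngram_size : Int), Dom_get_blocked_ngram_tokens reply_tokens ngram_size → Spec_get_blocked_ngram_tokens reply_tokens ngram_size (get_blocked_ngram_tokens reply_tokens ngram_size)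

-- ===== LEMMAS AND PROOFS =====

def pvEnc (xs : List Int) : Int := xs.foldl (fun h t => h * pvBASE + (t + pvOFF)) 0

-- the common reference fold both ports are reduced to
def pvRef (toks : List Int) (mNat : Nat) (d : Int) (acc : List Int) : List Int :=
  (PySem.List.pyRange d ((toks.length : Int) - (mNat : Int)) 1).foldl
    (fun acc s => if (toks.drop s.toNat).take mNat = toks.drop (toks.length - mNat)
                  then PySem.Set.add acc (PySem.List.pyGetD toks (s + (mNat : Int)) 0) else acc) acc

lemma pvEnc_aux (xs : List Int) : ∀ g : Int,
    xs.foldl (fun h t => h * pvBASE + (t + pvOFF)) g = g * pvBASE ^ xs.length + pvEnc xs := by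
  induction xs with
  | nil => intro g; simp [pvEnc]
  | cons x xs ih =>
    intro g
    simp only [pvEnc, List.foldl_cons, List.length_cons] at *
    rw [ih (g * pvBASE + (x + pvOFF)), ih (0 * pvBASE + (x + pvOFF))]
    ring

lemma pvEnc_cons (x : Int) (xs : List Int) :
    pvEnc (x :: xs) = (x + pvOFF) * pvBASE ^ xs.length + pvEnc xs := by
  have h0 : pvEnc (x :: xs)
      = List.foldl (fun h t => h * pvBASE + (t + pvOFF)) (0 * pvBASE + (x + pvOFF)) xs := rfl
  rw [h0, pvEnc_aux]; ring

lemma pvEnc_append_singleton (xs : List Int) (t : Int) :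
    pvEnc (xs ++ [t]) = pvEnc xs * pvBASE + (t + pvOFF) := by
  simp [pvEnc, List.foldl_append]

lemma pvBASE_pos : (0:Int) < pvBASE := by norm_num [pvBASE]

lemma pvEnc_bounds (xs : List Int) (hb : ∀ t ∈ xs, 0 ≤ t + pvOFF ∧ t + pvOFF < pvBASE) :
    0 ≤ pvEnc xs ∧ pvEnc xs < pvBASE ^ xs.length := by
  induction xs with
  | nil => simp [pvEnc]
  | cons x xs ih =>
    have hx := hb x (by simp)
    have ih' := ih (fun t ht => hb t (by simp [ht]))
    have hp : (0:Int) < pvBASE ^ xs.length := pow_pos pvBASE_pos _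
    rw [pvEnc_cons]
    refine ⟨by nlinarith [hx.1, ih'.1], ?_⟩
    have h1 : (x + pvOFF) * pvBASE ^ xs.length ≤ (pvBASE - 1) * pvBASE ^ xs.length := by
      nlinarith [hx.2]
    have h2 : pvBASE ^ (x :: xs).length = pvBASE * pvBASE ^ xs.length := by
      rw [List.length_cons, pow_succ]; ring
    rw [h2]
    nlinarith [ih'.2]

lemma pvEnc_inj (xs : List Int) : ∀ ys : List Int, xs.length = ys.length →
    (∀ t ∈ xs, 0 ≤ t + pvOFF ∧ t + pvOFF < pvBASE) →
    (∀ t ∈ ys, 0 ≤ t + pvOFF ∧ t + pvOFF < pvBASE) →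
    pvEnc xs = pvEnc ys → xs = ys := by
  induction xs with
  | nil =>
    intro ys hl _ _ _
    cases ys with
    | nil => rfl
    | cons y ys => simp at hl
  | cons x xs ih =>
    intro ys hl hbx hby he
    cases ys with
    | nil => simp at hl
    | cons y ys =>
      have hlen : xs.length = ys.length := by simpa using hl
      rw [pvEnc_cons, pvEnc_cons, hlen] at he
      have hp : (0:Int) < pvBASE ^ ys.length := pow_pos pvBASE_pos _
      have bx := pvEnc_bounds xs (fun t ht => hbx t (by simp [ht]))
      have by' := pvEnc_bounds ys (fun t ht => hby t (by simp [ht]))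
      rw [hlen] at bx
      have hxy : x = y := by
        rcases lt_trichotomy x y with h | h | h
        · exfalso
          have hd : (y - x) * pvBASE ^ ys.length = pvEnc xs - pvEnc ys := by linarith
          have h0 : 0 ≤ (y - x - 1) * pvBASE ^ ys.length :=
            mul_nonneg (by linarith) (le_of_lt hp)
          nlinarith [bx.1, bx.2, by'.1, by'.2]
        · exact h
        · exfalso
          have hd : (x - y) * pvBASE ^ ys.length = pvEnc ys - pvEnc xs := by linarith
          have h0 : 0 ≤ (x - y - 1) * pvBASE ^ ys.length :=
            mul_nonneg (by linarith) (le_of_lt hp)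
          nlinarith [bx.1, bx.2, by'.1, by'.2]
      subst hxy
      have hee : pvEnc xs = pvEnc ys := by linarith
      rw [ih ys hlen (fun t ht => hbx t (by simp [ht])) (fun t ht => hby t (by simp [ht])) hee]

lemma pvLoop (toks : List Int) (mNat : Nat) (hm1 : 1 ≤ mNat)
    (hb : ∀ t ∈ toks, 0 ≤ t + pvOFF ∧ t + pvOFF < pvBASE) :
    ∀ (c d : Nat) (acc : List Int), d + mNat + c = toks.length →
    ((PySem.List.pyRange ((d + mNat : Nat) : Int) (toks.length : Int) 1).foldl
      (fun (st : Int × List Int) i =>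
        ((st.1 - (PySem.List.pyGetD toks (i - (mNat : Int)) 0 + pvOFF) * pvBASE ^ (mNat - 1)) * pvBASE
            + (PySem.List.pyGetD toks i 0 + pvOFF),
         if st.1 = pvEnc (toks.drop (toks.length - mNat))
         then PySem.Set.add st.2 (PySem.List.pyGetD toks i 0) else st.2))
      (pvEnc ((toks.drop d).take mNat), acc)).2
    = pvRef toks mNat d acc := by
  intro c
  induction c with
  | zero =>
    intro d acc hlen
    rw [PySem.List.pyRange_one_eq_nil (by push_cast; omega)]
    unfold pvRef
    rw [PySem.List.pyRange_one_eq_nil (by omega)]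
    rfl
  | succ c ih =>
    intro d acc hlen
    have hdm : d + mNat < toks.length := by omega
    have hd : d < toks.length := by omega
    have hmn : mNat ≤ toks.length := by omega
    -- element facts
    have hget1 : PySem.List.pyGetD toks (((d + mNat : Nat) : Int) - (mNat : Int)) 0
        = toks[d] := by
      have hc : ((d + mNat : Nat) : Int) - (mNat : Int) = ((d : Nat) : Int) := by push_cast; omega
      rw [hc, PySem.List.pyGetD_natCast, List.getD_eq_getElem _ _ hd]
    have hget2 : PySem.List.pyGetD toks ((d + mNat : Nat) : Int) 0 = toks[d + mNat] := by
      rw [PySem.List.pyGetD_natCast, List.getD_eq_getElem _ _ hdm]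
    -- window decompositions
    have hdrop : toks.drop d = toks[d] :: toks.drop (d + 1) := List.drop_eq_getElem_cons hd
    have hwin : (toks.drop d).take mNat
        = toks[d] :: (toks.drop (d + 1)).take (mNat - 1) := by
      rw [hdrop]
      have h1 : mNat = (mNat - 1) + 1 := by omega
      conv_lhs => rw [h1]
      rw [List.take_succ_cons]
    have hrestlen : ((toks.drop (d + 1)).take (mNat - 1)).length = mNat - 1 := by
      simp [List.length_take, List.length_drop]; omega
    have hwin' : (toks.drop (d + 1)).take mNat
        = (toks.drop (d + 1)).take (mNat - 1) ++ [toks[d + mNat]] := by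
      have h1 : mNat = (mNat - 1) + 1 := by omega
      conv_lhs => rw [h1]
      rw [List.take_add_one]
      have h2 : (toks.drop (d + 1))[mNat - 1]? = some toks[d + mNat] := by
        rw [List.getElem?_drop]
        have h3 : d + 1 + (mNat - 1) = d + mNat := by omega
        rw [h3, List.getElem?_eq_getElem hdm]
      rw [h2]
      rfl
    have henc_win : pvEnc ((toks.drop d).take mNat)
        = (toks[d] + pvOFF) * pvBASE ^ (mNat - 1) + pvEnc ((toks.drop (d + 1)).take (mNat - 1)) := by
      rw [hwin, pvEnc_cons, hrestlen]
    have hstep : (pvEnc ((toks.drop d).take mNat)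
          - (PySem.List.pyGetD toks (((d + mNat : Nat) : Int) - (mNat : Int)) 0 + pvOFF) * pvBASE ^ (mNat - 1)) * pvBASE
          + (PySem.List.pyGetD toks ((d + mNat : Nat) : Int) 0 + pvOFF)
        = pvEnc ((toks.drop (d + 1)).take mNat) := by
      rw [hget1, hget2, henc_win, hwin', pvEnc_append_singleton]
      ring
    -- bounds and lengths for the injectivity of the encoding
    have hbw : ∀ t ∈ (toks.drop d).take mNat, 0 ≤ t + pvOFF ∧ t + pvOFF < pvBASE :=
      fun t ht => hb t (List.mem_of_mem_drop (List.mem_of_mem_take ht))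
    have hbp : ∀ t ∈ toks.drop (toks.length - mNat), 0 ≤ t + pvOFF ∧ t + pvOFF < pvBASE :=
      fun t ht => hb t (List.mem_of_mem_drop ht)
    have hlw : ((toks.drop d).take mNat).length = mNat := by
      simp [List.length_take, List.length_drop]; omega
    have hlp : (toks.drop (toks.length - mNat)).length = mNat := by
      simp [List.length_drop]; omega
    have hiff : (pvEnc ((toks.drop d).take mNat) = pvEnc (toks.drop (toks.length - mNat)))
        ↔ (toks.drop d).take mNat = toks.drop (toks.length - mNat) := by
      constructor
      · exact pvEnc_inj _ _ (by rw [hlw, hlp]) hbw hbp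
      · intro h; rw [h]
    -- unfold one step of the loop
    rw [PySem.List.pyRange_one_cons (by push_cast; omega), List.foldl_cons]
    have hnext : ((d + mNat : Nat) : Int) + 1 = (((d + 1) + mNat : Nat) : Int) := by push_cast; omega
    rw [hnext, hstep]
    rw [ih (d + 1) _ (by omega)]
    -- now the reference side
    unfold pvRef
    rw [PySem.List.pyRange_one_cons (show (d : Int) < (toks.length : Int) - (mNat : Int) by omega),
        List.foldl_cons]
    have hcast2 : ((d : Nat) : Int) + 1 = (((d + 1) : Nat) : Int) := by push_cast; omega
    have hcast3 : ((d : Nat) : Int) + (mNat : Int) = ((d + mNat : Nat) : Int) := (Nat.cast_add d mNat).symm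
    rw [hcast2, hcast3]
    simp only [Int.toNat_natCast, hget2, hiff]

lemma pvB_eq_ref (toks : List Int) (k : Int) (h2 : 2 ≤ k) (hmn : k - 1 ≤ (toks.length : Int))
    (hb : ∀ t ∈ toks, 0 ≤ t + pvOFF ∧ t + pvOFF < pvBASE) :
    get_blocked_ngram_tokens_alt toks k = pvRef toks (k - 1).toNat 0 [] := by
  have hk0 : (0:Int) ≤ k - 1 := by omega
  set mNat := (k - 1).toNat with hm
  have hk1 : ((mNat : Nat) : Int) = k - 1 := Int.toNat_of_nonneg hk0
  have hm1 : 1 ≤ mNat := by omega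
  have c1 : ¬ (k < 2) := by omega
  have c2 : ¬ ((toks.length : Int) < k - 1) := by omega
  simp only [get_blocked_ngram_tokens_alt]
  rw [if_neg c1, if_neg c2]
  rw [PySem.List.slice_from toks (show (0:Int) ≤ (toks.length : Int) - (k - 1) by omega),
      PySem.List.slice_to toks hk0]
  have e1 : ((toks.length : Int) - (k - 1)).toNat = toks.length - mNat := by omega
  have e2 : (k - 1 - 1).toNat = mNat - 1 := by omega
  rw [e1, e2]
  have ep : ∀ xs : List Int,
      List.foldl (fun h t => h * pvBASE + (t + pvOFF)) 0 xs = pvEnc xs := fun _ => rfl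
  rw [ep, ep]
  rw [← hk1]
  have hloop := pvLoop toks mNat hm1 hb (toks.length - mNat) 0 [] (by omega)
  simp only [Nat.zero_add, List.drop_zero] at hloop
  exact hloop

lemma pvA_eq_ref (toks : List Int) (k : Int) (h2 : 2 ≤ k) (hmn : k - 1 ≤ (toks.length : Int)) :
    get_blocked_ngram_tokens toks k = pvRef toks (k - 1).toNat 0 [] := by
  have hk0 : (0:Int) ≤ k - 1 := by omega
  set mNat := (k - 1).toNat with hm
  have hk1 : ((mNat : Nat) : Int) = k - 1 := Int.toNat_of_nonneg hk0
  have hm1 : 1 ≤ mNat := by omega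
  have c1 : ¬ (k < 2) := by omega
  have c2 : ¬ ((toks.length : Int) < k - 1) := by omega
  simp only [get_blocked_ngram_tokens]
  rw [if_neg c1, if_neg c2]
  have e0 : (toks.length : Int) - k + 1 = (toks.length : Int) - (mNat : Int) := by omega
  rw [e0, ← hk1]
  rw [PySem.List.slice_from_neg_natCast toks mNat (by omega)]
  unfold pvRef
  apply PySem.List.foldl_congr_mem
  intro acc s hs
  obtain ⟨hs0, hs1⟩ := PySem.List.mem_pyRange_one.1 hs
  have e3 : (s + k).toNat - s.toNat = mNat + 1 := by omega
  rw [PySem.List.slice_toNat toks hs0 (by omega), e3, PySem.List.slice_to_neg_one]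
  have hsn : s.toNat + mNat < toks.length := by omega
  have hlenn : (List.take (mNat + 1) (List.drop s.toNat toks)).length = mNat + 1 := by
    simp [List.length_take, List.length_drop]; omega
  have hne : List.take (mNat + 1) (List.drop s.toNat toks) ≠ [] := by
    intro h; rw [h] at hlenn; simp at hlenn
  have hdl : (List.take (mNat + 1) (List.drop s.toNat toks)).dropLast
      = List.take mNat (List.drop s.toNat toks) := by
    rw [List.dropLast_eq_take, hlenn, List.take_take]
    congr 1
    omega
  have hel : PySem.List.pyGetD (List.take (mNat + 1) (List.drop s.toNat toks)) (-1) 0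
      = PySem.List.pyGetD toks (s + (mNat : Int)) 0 := by
    rw [PySem.List.pyGetD_neg_one _ 0 hne, List.getLast_eq_getElem,
        PySem.List.pyGetD_eq_getElem toks 0 (by omega) (by omega)]
    have hidx : (s + (mNat : Int)).toNat = s.toNat + mNat := by omega
    simp only [List.getElem_take, List.getElem_drop, hlenn, hidx]
    congr 1
  rw [hdl, hel]

-- ===== VERDICT (by name: the statement is the Claim_ definition above) =====
theorem get_blocked_ngram_tokens_spec : Claim_equal_get_blocked_ngram_tokens := by
  intro toks k hdom
  unfold Spec_get_blocked_ngram_tokens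
  by_cases h2 : k < 2
  · simp [get_blocked_ngram_tokens, get_blocked_ngram_tokens_alt, h2]
  · by_cases hmn : (toks.length : Int) < k - 1
    · simp [get_blocked_ngram_tokens, get_blocked_ngram_tokens_alt, h2, hmn]
    · have hb : ∀ t ∈ toks, 0 ≤ t + pvOFF ∧ t + pvOFF < pvBASE := by
        unfold Dom_get_blocked_ngram_tokens at hdom
        simp only [Bool.and_eq_true, List.all_eq_true, pvDomInt, decide_eq_true_eq] at hdom
        intro t ht
        have := hdom.1 t ht
        simp only [pvBASE, pvOFF]
        omega
      rw [pvA_eq_ref toks k (by omega) (by omega),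
          pvB_eq_ref toks k (by omega) (by omega) hb]
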